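-- pv_equiv track=rewrite | github.com/Edecker123/FCK | Compilers/arctic_passes/v2p_pass.py | update_graph_ranks
-- ===== SOURCE A (Python) =====
-- def update_graph_ranks(graph, ranks):
--     # Normalize ranks
--     min_rank = min(ranks.values())
--     normalized_ranks = {vertex: rank - min_rank for vertex, rank in ranks.items()}
--
--     # Invert the graph structure for easier manipulation
--     # Mapping from vertex IDs to their new rank and original position
--     vertex_to_rank_position = {}
--     for layer, vertices in graph.items():
--         for vertex, position in vertices.items():
--             new_rank = normalized_ranks.get(vertex, 0)  # Default to rank 0 if not found
--             vertex_to_rank_position[vertex] = (new_rank, position)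
--
--     # Sort vertices first by rank then by original position to maintain order within ranks
--     sorted_vertices = sorted(vertex_to_rank_position.items(), key=lambda x: (x[1][0], x[1][1]))
--
--     # Reconstruct the graph based on sorted vertices
--     updated_graph = {}
--     for vertex, (rank, position) in sorted_vertices:
--         if rank not in updated_graph:
--             updated_graph[rank] = {}
--         # Assign new positions within the same rank based on original order
--         updated_graph[rank][vertex] = len(updated_graph[rank])
--
--     return updated_graph
-- ===== SOURCE B (Python) =====
-- def update_graph_ranks(graph, ranks):
--     # Single pass: drop vertices straight into per-rank buckets (dicts keep
--     # first-occurrence order, overwrite positions in place), then emit ranks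
--     # ascending, each bucket stably sorted by original position.
--     mn = min(ranks.values())
--     buckets = {}
--     for vertices in graph.values():
--         for vertex, position in vertices.items():
--             r = ranks.get(vertex, mn) - mn
--             buckets.setdefault(r, {})[vertex] = position
--     return {r: {v: i for i, (v, _) in
--                 enumerate(sorted(buckets[r].items(), key=lambda t: t[1]))}
--             for r in sorted(buckets)}
-- ===== Notes on version B (the rewrite author's own statement) =====
-- stated objective: alternative
-- what changed: Drops A's normalized-ranks dict, global vertex->(rank,position) map and single lexicographic sort: B buckets vertices by rank in one pass over the graph (computing each rank on the fly from ranks.get) and then sorts each bucket by position alone, emitting ranks in ascending order.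
-- outside the precondition, e.g. on update_graph_ranks({}, {}): A raises ValueError, B raises ValueError
import Mathlib
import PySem

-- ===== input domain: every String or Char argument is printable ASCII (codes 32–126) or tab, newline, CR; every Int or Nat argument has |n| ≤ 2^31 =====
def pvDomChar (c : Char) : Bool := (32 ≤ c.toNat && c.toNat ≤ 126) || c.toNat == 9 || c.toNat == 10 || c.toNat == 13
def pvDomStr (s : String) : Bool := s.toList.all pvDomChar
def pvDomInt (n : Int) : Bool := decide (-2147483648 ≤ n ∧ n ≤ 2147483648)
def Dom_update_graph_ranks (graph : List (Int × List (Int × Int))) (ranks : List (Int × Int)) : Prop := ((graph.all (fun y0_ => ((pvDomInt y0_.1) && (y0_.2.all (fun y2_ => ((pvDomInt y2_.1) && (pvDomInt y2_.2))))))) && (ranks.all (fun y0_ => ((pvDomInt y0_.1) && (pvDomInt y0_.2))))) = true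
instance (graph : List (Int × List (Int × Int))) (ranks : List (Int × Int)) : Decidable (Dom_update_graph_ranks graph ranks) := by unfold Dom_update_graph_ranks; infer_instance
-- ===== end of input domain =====

-- B skips A's normalized-ranks dict and global vertex->(rank,position) map with its single
-- lexicographic sort: it drops vertices straight into per-rank buckets in one pass (rank
-- computed on the fly) and sorts each bucket by position alone (objective: alternative).

-- ===== PORT A =====
def update_graph_ranks (graph : List (Int × List (Int × Int))) (ranks : List (Int × Int)) : List (Int × List (Int × Int)) :=
  let ranksD : PySem.Dict Int Int := PySem.Dict.ofList ranks
  match PySem.List.min? ranksD.values (fun v => v) with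
  | none => []  -- Python raises ValueError here (min of empty sequence); excluded by Pre_
  | some min_rank =>
    let normalized_ranks : PySem.Dict Int Int :=
      ranksD.items.foldl (fun d p => d.insert p.1 (p.2 - min_rank)) PySem.Dict.empty
    let graphD : PySem.Dict Int (PySem.Dict Int Int) :=
      PySem.Dict.ofList (graph.map (fun p => (p.1, PySem.Dict.ofList p.2)))
    let vmap : PySem.Dict Int (Int × Int) :=
      graphD.items.foldl (fun d lp =>
        lp.2.items.foldl (fun d vp => d.insert vp.1 (normalized_ranks.getD vp.1 0, vp.2)) d)
        PySem.Dict.empty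
    let sorted_vertices := PySem.List.sorted2 vmap.items (fun x => x.2.1) (fun x => x.2.2)
    let updated : PySem.Dict Int (PySem.Dict Int Int) :=
      sorted_vertices.foldl (fun u t =>
        let u1 := if u.contains t.2.1 then u else u.insert t.2.1 PySem.Dict.empty
        u1.insert t.2.1 ((u1.getD t.2.1 PySem.Dict.empty).insert t.1
          ((u1.getD t.2.1 PySem.Dict.empty).size : Int))) PySem.Dict.empty
    updated.items.map (fun p => (p.1, p.2.items))

-- ===== PORT B =====
-- buckets.setdefault(r, {})[v] = pos is ported as Dict.modify r empty (·.insert v pos)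
-- (exactly d[k] = f(d.get(k, dflt))); buckets[r] for r drawn from buckets' keys is getD.
def update_graph_ranks_alt (graph : List (Int × List (Int × Int))) (ranks : List (Int × Int)) : List (Int × List (Int × Int)) :=
  let ranksD : PySem.Dict Int Int := PySem.Dict.ofList ranks
  match PySem.List.min? ranksD.values (fun v => v) with
  | none => []  -- Python raises ValueError here (min of empty sequence); excluded by Pre_
  | some mn =>
    let buckets : PySem.Dict Int (PySem.Dict Int Int) :=
      (PySem.Dict.ofList (graph.map (fun p => (p.1, PySem.Dict.ofList p.2)))).values.foldl
        (fun b vertices =>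
          vertices.items.foldl (fun b vp =>
            b.modify (ranksD.getD vp.1 mn - mn) PySem.Dict.empty
              (fun inner => inner.insert vp.1 vp.2)) b)
        PySem.Dict.empty
    ((PySem.List.sorted buckets.keys (fun r => r)).foldl (fun u r =>
        u.insert r (PySem.Dict.ofList
          ((PySem.List.enumerate
              (PySem.List.sorted (buckets.getD r PySem.Dict.empty).items (fun t => t.2)) 0).map
            (fun p => (p.2.1, p.1)))))
      (PySem.Dict.empty : PySem.Dict Int (PySem.Dict Int Int))).items.map
      (fun p => (p.1, p.2.items))

-- ===== PRECONDITION & SPEC =====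
-- Pre_ excludes exactly the inputs where Python A raises: min(ranks.values()) is a ValueError on an empty ranks dict.
def Pre_update_graph_ranks (graph : List (Int × List (Int × Int))) (ranks : List (Int × Int)) : Prop := ranks ≠ []
instance (graph : List (Int × List (Int × Int))) (ranks : List (Int × Int)) : Decidable (Pre_update_graph_ranks graph ranks) := by unfold Pre_update_graph_ranks; infer_instance
def pvWitness_update_graph_ranks : (List (Int × List (Int × Int))) × (List (Int × Int)) := ([(0, [(1, 2), (3, 0)])], [(1, 5), (3, 4)])

def Spec_update_graph_ranks (graph : List (Int × List (Int × Int))) (ranks : List (Int × Int)) (out : List (Int × List (Int × Int))) : Prop := out = update_graph_ranks_alt graph ranks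
instance (graph : List (Int × List (Int × Int))) (ranks : List (Int × Int)) (out : List (Int × List (Int × Int))) : Decidable (Spec_update_graph_ranks graph ranks out) := by unfold Spec_update_graph_ranks; infer_instance

-- ===== CLAIM (what is proved, stated in full; the proofs are below) =====
def Claim_equal_update_graph_ranks : Prop := ∀ (graph : List (Int × List (Int × Int))) (ranks : List (Int × Int)), Dom_update_graph_ranks graph ranks → Pre_update_graph_ranks graph ranks → Spec_update_graph_ranks graph ranks (update_graph_ranks graph ranks)

-- ===== LEMMAS AND PROOFS =====

-- A's lexicographic comparator (the `lt` inside PySem.List.sorted2 at our keys)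
def pvLex (a b : Int × (Int × Int)) : Bool :=
  decide (a.2.1 < b.2.1) || (!decide (b.2.1 < a.2.1) && decide (a.2.2 < b.2.2))

def pvNum (l : List Int) : List (Int × Int) :=
  (PySem.List.enumerate l 0).map (fun p => (p.2, p.1))

def pvAStep (u : PySem.Dict Int (PySem.Dict Int Int)) (t : Int × (Int × Int)) : PySem.Dict Int (PySem.Dict Int Int) :=
  (if u.contains t.2.1 then u else u.insert t.2.1 PySem.Dict.empty).insert t.2.1
    (((if u.contains t.2.1 then u else u.insert t.2.1 PySem.Dict.empty).getD t.2.1 PySem.Dict.empty).insert t.1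
      ((((if u.contains t.2.1 then u else u.insert t.2.1 PySem.Dict.empty).getD t.2.1 PySem.Dict.empty)).size : Int))

def pvASide (S : List (Int × (Int × Int))) : List (Int × List (Int × Int)) :=
  ((PySem.List.sorted2 S (fun x => x.2.1) (fun x => x.2.2)).foldl pvAStep PySem.Dict.empty).items.map
    (fun p => (p.1, p.2.items))

def pvBuckets (S : List (Int × (Int × Int))) : PySem.Dict Int (List (Int × Int)) :=
  S.foldl (fun d t => d.modify t.2.1 [] (fun l => l ++ [(t.1, t.2.2)])) PySem.Dict.empty

def pvBSide (S : List (Int × (Int × Int))) : List (Int × List (Int × Int)) :=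
  ((PySem.List.sorted (pvBuckets S).keys (fun r => r)).foldl (fun u r =>
    u.insert r (PySem.Dict.ofList ((PySem.List.enumerate
      (PySem.List.sorted ((pvBuckets S).getD r []) (fun t => t.2)) 0).map (fun p => (p.2.1, p.1)))))
    PySem.Dict.empty).items.map (fun p => (p.1, p.2.items))

-- B's pieces, abstracted over the rank function rk and the flattened (vertex, position) stream L
def pvVm (rk : Int → Int) (L : List (Int × Int)) : PySem.Dict Int (Int × Int) :=
  L.foldl (fun d vp => d.insert vp.1 (rk vp.1, vp.2)) PySem.Dict.empty

def pvBk (rk : Int → Int) (L : List (Int × Int)) : PySem.Dict Int (PySem.Dict Int Int) :=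
  L.foldl (fun b vp => b.modify (rk vp.1) PySem.Dict.empty (fun inner => inner.insert vp.1 vp.2)) PySem.Dict.empty

def pvBSide2 (bk : PySem.Dict Int (PySem.Dict Int Int)) : List (Int × List (Int × Int)) :=
  ((PySem.List.sorted bk.keys (fun r => r)).foldl (fun u r =>
    u.insert r (PySem.Dict.ofList ((PySem.List.enumerate
      (PySem.List.sorted (bk.getD r PySem.Dict.empty).items (fun t => t.2)) 0).map (fun p => (p.2.1, p.1)))))
    PySem.Dict.empty).items.map (fun p => (p.1, p.2.items))

-- the ports, re-expressed through pvASide / pvBSide2 (definitional)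
theorem pvA_eq (graph : List (Int × List (Int × Int))) (ranks : List (Int × Int)) :
    update_graph_ranks graph ranks =
      match PySem.List.min? (PySem.Dict.ofList ranks : PySem.Dict Int Int).values (fun v => v) with
      | none => []
      | some min_rank =>
        pvASide ((PySem.Dict.ofList (graph.map (fun p => (p.1, PySem.Dict.ofList p.2))) : PySem.Dict Int (PySem.Dict Int Int)).items.foldl
          (fun d lp => lp.2.items.foldl (fun d vp => d.insert vp.1
            (((PySem.Dict.ofList ranks : PySem.Dict Int Int).items.foldl (fun d p => d.insert p.1 (p.2 - min_rank)) PySem.Dict.empty).getD vp.1 0, vp.2)) d)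
          PySem.Dict.empty).items := by
  rfl

theorem pvB_eq (graph : List (Int × List (Int × Int))) (ranks : List (Int × Int)) :
    update_graph_ranks_alt graph ranks =
      match PySem.List.min? (PySem.Dict.ofList ranks : PySem.Dict Int Int).values (fun v => v) with
      | none => []
      | some mn =>
        pvBSide2 ((PySem.Dict.ofList (graph.map (fun p => (p.1, PySem.Dict.ofList p.2))) : PySem.Dict Int (PySem.Dict Int Int)).values.foldl
          (fun b vertices => vertices.items.foldl (fun b vp =>
            b.modify ((PySem.Dict.ofList ranks : PySem.Dict Int Int).getD vp.1 mn - mn) PySem.Dict.empty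
              (fun inner => inner.insert vp.1 vp.2)) b)
          PySem.Dict.empty) := by
  rfl

theorem pvLex_false_iff (a b : Int × (Int × Int)) :
    pvLex a b = false ↔ (b.2.1 < a.2.1 ∨ (a.2.1 = b.2.1 ∧ ¬ a.2.2 < b.2.2)) := by
  rcases a with ⟨av, ar, ap⟩; rcases b with ⟨bv, br, bp⟩
  unfold pvLex
  by_cases h1 : ar < br <;> by_cases h2 : br < ar <;> by_cases h3 : ap < bp <;>
    simp [h1, h2, h3] <;> omega

theorem pvLex_true_iff (a b : Int × (Int × Int)) :
    pvLex a b = true ↔ (a.2.1 < b.2.1 ∨ (a.2.1 = b.2.1 ∧ a.2.2 < b.2.2)) := by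
  rcases a with ⟨av, ar, ap⟩; rcases b with ⟨bv, br, bp⟩
  unfold pvLex
  by_cases h1 : ar < br <;> by_cases h2 : br < ar <;> by_cases h3 : ap < bp <;>
    simp [h1, h2, h3] <;> omega

-- pvLex is the comparator sorted2 uses at our keys
theorem pvSorted2_eq (S : List (Int × (Int × Int))) :
    PySem.List.sorted2 S (fun x => x.2.1) (fun x => x.2.2) =
      S.foldl (fun acc x => PySem.List.insertBy pvLex x acc) [] := by
  rfl

theorem pvPairwise_insertBy (x : Int × (Int × Int)) (ys : List (Int × (Int × Int)))
    (hp : ys.Pairwise (fun a b => pvLex b a = false)) :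
    (PySem.List.insertBy pvLex x ys).Pairwise (fun a b => pvLex b a = false) := by
  induction ys with
  | nil => simp [PySem.List.insertBy]
  | cons y t ih =>
    rcases List.pairwise_cons.mp hp with ⟨hy, ht⟩
    simp only [PySem.List.insertBy]
    by_cases hxy : pvLex x y = true
    · rw [if_pos hxy]
      refine List.pairwise_cons.mpr ⟨?_, hp⟩
      intro z hz
      rcases List.mem_cons.mp hz with rfl | hz
      · rw [pvLex_false_iff]; rw [pvLex_true_iff] at hxy; omega
      · have h1 := hy z hz
        rw [pvLex_false_iff] at h1 ⊢; rw [pvLex_true_iff] at hxy; omega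
    · rw [if_neg hxy]
      refine List.pairwise_cons.mpr ⟨?_, ih ht⟩
      intro z hz
      rcases (PySem.List.mem_insertBy pvLex x z t).mp hz with rfl | hz
      · exact Bool.eq_false_iff.mpr hxy
      · exact hy z hz

theorem pvPairwise_sort (S : List (Int × (Int × Int))) :
    (S.foldl (fun acc x => PySem.List.insertBy pvLex x acc) []).Pairwise (fun a b => pvLex b a = false) := by
  suffices h : ∀ (l : List (Int × (Int × Int))) (acc : List (Int × (Int × Int))),
      acc.Pairwise (fun a b => pvLex b a = false) →
      (l.foldl (fun acc x => PySem.List.insertBy pvLex x acc) acc).Pairwise (fun a b => pvLex b a = false) by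
    exact h S [] (by simp)
  intro l
  induction l with
  | nil => intro acc hacc; simpa using hacc
  | cons x t ih => intro acc hacc; exact ih _ (pvPairwise_insertBy x acc hacc)

-- filtering a lex-sorted insertion to one rank
theorem pvFilter_insertBy (r : Int) (x : Int × (Int × Int)) (ys : List (Int × (Int × Int)))
    (hp : ys.Pairwise (fun a b => pvLex b a = false)) :
    (PySem.List.insertBy pvLex x ys).filter (fun t => t.2.1 == r) =
      if x.2.1 = r then
        PySem.List.insertBy (fun a b => decide (a.2.2 < b.2.2)) x (ys.filter (fun t => t.2.1 == r))
      else ys.filter (fun t => t.2.1 == r) := by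
  induction ys with
  | nil =>
    by_cases hxr : x.2.1 = r <;> simp [PySem.List.insertBy, hxr]
  | cons y t ih =>
    rcases List.pairwise_cons.mp hp with ⟨hy, ht⟩
    simp only [PySem.List.insertBy]
    by_cases hxy : pvLex x y = true
    · rw [if_pos hxy]
      by_cases hxr : x.2.1 = r
      · rw [if_pos hxr]
        have hx : (x.2.1 == r) = true := by simpa using hxr
        rw [show List.filter (fun t => (t.2.1 == r)) (x :: y :: t)
            = x :: List.filter (fun t => (t.2.1 == r)) (y :: t) from List.filter_cons_of_pos hx]
        cases hf : List.filter (fun t => t.2.1 == r) (y :: t) with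
        | nil => simp [PySem.List.insertBy]
        | cons y' t' =>
          have hy'mem : y' ∈ List.filter (fun t => t.2.1 == r) (y :: t) := by
            rw [hf]; exact List.mem_cons_self
          rcases List.mem_filter.mp hy'mem with ⟨hy'in, hy'r⟩
          have hy'r' : y'.2.1 = r := by simpa using hy'r
          have hb2 : decide (x.2.2 < y'.2.2) = true := by
            rw [pvLex_true_iff] at hxy
            rcases List.mem_cons.mp hy'in with rfl | hy'in
            · simp only [decide_eq_true_eq]; omega
            · have := hy y' hy'in
              rw [pvLex_false_iff] at this
              simp only [decide_eq_true_eq]; omega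
          simp [PySem.List.insertBy, hb2]
      · rw [if_neg hxr]
        have hx : (x.2.1 == r) = false := by simpa using hxr
        simp [List.filter_cons, hx]
    · rw [if_neg hxy]
      have hxyf : pvLex x y = false := Bool.eq_false_iff.mpr hxy
      by_cases hyr : y.2.1 = r
      · have hyb : (y.2.1 == r) = true := by simpa using hyr
        simp only [List.filter_cons, hyb, if_pos rfl]
        rw [ih ht]
        by_cases hxr : x.2.1 = r
        · rw [if_pos hxr, if_pos hxr]
          have hb2 : ¬ decide (x.2.2 < y.2.2) = true := by
            rw [pvLex_false_iff] at hxyf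
            simp only [decide_eq_true_eq]; omega
          simp [PySem.List.insertBy, hb2]
        · rw [if_neg hxr, if_neg hxr]
      · have hyb : (y.2.1 == r) = false := by simpa using hyr
        simp only [List.filter_cons, hyb]
        rw [ih ht]
        by_cases hxr : x.2.1 = r
        · rw [if_pos hxr, if_pos hxr]
          simp
        · rw [if_neg hxr, if_neg hxr]

theorem pvFilter_sorted2 (S : List (Int × (Int × Int))) (r : Int) :
    (PySem.List.sorted2 S (fun x => x.2.1) (fun x => x.2.2)).filter (fun t => t.2.1 == r) =
      PySem.List.sorted (S.filter (fun t => t.2.1 == r)) (fun t => t.2.2) := by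
  rw [pvSorted2_eq, PySem.List.sorted_eq_foldl_insertBy]
  induction S using List.reverseRecOn with
  | nil => simp
  | append_singleton S x ih =>
    rw [List.foldl_append, List.foldl_cons, List.foldl_nil,
      pvFilter_insertBy r x _ (pvPairwise_sort S), ih, List.filter_append,
      List.foldl_append, List.filter_cons, List.filter_nil]
    by_cases hxr : x.2.1 = r
    · have hx : (x.2.1 == r) = true := by simpa using hxr
      rw [if_pos hxr]
      simp [hx]
    · have hx : (x.2.1 == r) = false := by simpa using hxr
      rw [if_neg hxr]
      simp [hx]

-- dedup of an appended element
theorem pvDedup_append (l : List Int) (a : Int) :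
    PySem.List.dedup (l ++ [a]) = if a ∈ l then PySem.List.dedup l else PySem.List.dedup l ++ [a] := by
  simp only [PySem.List.dedup_eq_ofList, PySem.Set.ofList_eq_foldl, List.foldl_append, List.foldl_cons, List.foldl_nil]
  simp only [PySem.Set.add, PySem.Set.contains]
  have hm : a ∈ List.foldl PySem.Set.add [] l ↔ a ∈ l := by
    rw [← PySem.Set.ofList_eq_foldl]
    exact PySem.Set.mem_ofList l a
  by_cases h : a ∈ l
  · simp [List.elem_eq_contains, List.elem_iff, hm, h]
  · simp [List.elem_eq_contains, List.elem_iff, hm, h]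

theorem pvDedup_sublist (l : List Int) : (PySem.List.dedup l).Sublist l := by
  have key : ∀ (l : List Int) (s : List Int), ∃ t, List.foldl PySem.Set.add s l = s ++ t ∧ t.Sublist l := by
    intro l
    induction l with
    | nil => intro s; exact ⟨[], by simp⟩
    | cons a l ih =>
      intro s
      simp only [List.foldl_cons, PySem.Set.add]
      by_cases h : PySem.Set.contains s a = true
      · simp only [h, if_pos rfl]
        obtain ⟨t, ht, hs⟩ := ih s
        exact ⟨t, ht, hs.cons a⟩
      · simp only [h]
        obtain ⟨t, ht, hs⟩ := ih (s ++ [a])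
        refine ⟨a :: t, by simpa using ht, hs.cons₂ a⟩
  obtain ⟨t, ht, hs⟩ := key l []
  simpa [PySem.List.dedup_eq_ofList, PySem.Set.ofList_eq_foldl, ht] using hs

theorem pvNum_append (l : List Int) (v : Int) :
    pvNum (l ++ [v]) = pvNum l ++ [(v, (l.length : Int))] := by
  unfold pvNum
  rw [PySem.List.enumerate_append]
  simp [PySem.List.enumerate_cons, PySem.List.enumerate_nil]

theorem pvMap_fst_num (l : List Int) : (pvNum l).map (fun p => p.1) = l := by
  unfold pvNum
  rw [List.map_map]
  exact PySem.List.map_snd_enumerate l 0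

theorem pvAStep_of_contains (u : PySem.Dict Int (PySem.Dict Int Int)) (t : Int × (Int × Int))
    (h : u.contains t.2.1 = true) :
    pvAStep u t = u.insert t.2.1 ((u.getD t.2.1 PySem.Dict.empty).insert t.1
      ((u.getD t.2.1 PySem.Dict.empty).size : Int)) := by
  unfold pvAStep
  rw [if_pos h]

theorem pvAStep_of_not_contains (u : PySem.Dict Int (PySem.Dict Int Int)) (t : Int × (Int × Int))
    (h : u.contains t.2.1 = false) :
    pvAStep u t = u.insert t.2.1 (PySem.Dict.empty.insert t.1 0) := by
  unfold pvAStep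
  rw [if_neg (by simp [h]), PySem.Dict.getD_insert_self, PySem.Dict.insert_insert_self]
  norm_num [PySem.Dict.size_empty]

theorem pvMk_keys (l : List Int) : (PySem.Dict.mk (pvNum l)).keys = l := by
  simpa [PySem.Dict.keys] using pvMap_fst_num l

theorem pvFilter_append_ne (S : List (Int × (Int × Int))) (t : Int × (Int × Int)) (r : Int)
    (h : ¬ t.2.1 = r) :
    (S ++ [t]).filter (fun s => s.2.1 == r) = S.filter (fun s => s.2.1 == r) := by
  rw [List.filter_append]
  simp [h]

-- the A-side reconstruction fold, characterised on any vertex-distinct list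
theorem pvAFold_items (S : List (Int × (Int × Int))) (hnd : (S.map (fun t => t.1)).Nodup) :
    (S.foldl pvAStep PySem.Dict.empty).items =
      (PySem.List.dedup (S.map (fun t => t.2.1))).map
        (fun r => (r, PySem.Dict.mk (pvNum ((S.filter (fun t => t.2.1 == r)).map (fun t => t.1))))) := by
  induction S using List.reverseRecOn with
  | nil => rfl
  | append_singleton S t ih =>
    rw [List.map_append, List.nodup_append] at hnd
    obtain ⟨hndS, -, hdisj⟩ := hnd
    have hv : t.1 ∉ S.map (fun s => s.1) := fun hmem => hdisj t.1 hmem t.1 (by simp) rfl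
    have hitems := ih hndS
    have hkeys : (S.foldl pvAStep PySem.Dict.empty).keys = PySem.List.dedup (S.map (fun s => s.2.1)) := by
      simp only [PySem.Dict.keys, hitems, List.map_map]
      simp [Function.comp_def]
    have hknd : (S.foldl pvAStep PySem.Dict.empty).keys.Nodup := by
      rw [hkeys]; exact PySem.List.nodup_dedup _
    rw [List.foldl_append, List.foldl_cons, List.foldl_nil]
    by_cases hr : t.2.1 ∈ S.map (fun s => s.2.1)
    · have hcont : (S.foldl pvAStep PySem.Dict.empty).contains t.2.1 = true := by
        rw [PySem.Dict.contains_eq_decide_mem_keys, hkeys]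
        simp [PySem.List.mem_dedup, hr]
      have hmem : (t.2.1, PySem.Dict.mk (pvNum ((S.filter (fun s => s.2.1 == t.2.1)).map (fun s => s.1))))
          ∈ (S.foldl pvAStep PySem.Dict.empty).items := by
        rw [hitems]
        exact List.mem_map_of_mem ((PySem.List.mem_dedup _ _).mpr hr)
      have hgd : (S.foldl pvAStep PySem.Dict.empty).getD t.2.1 PySem.Dict.empty
          = PySem.Dict.mk (pvNum ((S.filter (fun s => s.2.1 == t.2.1)).map (fun s => s.1))) :=
        PySem.Dict.getD_of_mem_items _ hmem hknd _
      have hvin : (PySem.Dict.mk (pvNum ((S.filter (fun s => s.2.1 == t.2.1)).map (fun s => s.1)))).contains t.1 = false := by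
        rw [PySem.Dict.contains_eq_decide_mem_keys, pvMk_keys]
        simp only [decide_eq_false_iff_not]
        intro hmem'
        rcases List.mem_map.mp hmem' with ⟨s, hsmem, hse⟩
        exact hv (hse ▸ List.mem_map_of_mem (f := fun s => s.1) (List.mem_of_mem_filter hsmem))
      have hinner : (PySem.Dict.mk (pvNum ((S.filter (fun s => s.2.1 == t.2.1)).map (fun s => s.1)))).insert t.1
            ((PySem.Dict.mk (pvNum ((S.filter (fun s => s.2.1 == t.2.1)).map (fun s => s.1)))).size : Int)
          = PySem.Dict.mk (pvNum (((S.filter (fun s => s.2.1 == t.2.1)).map (fun s => s.1)) ++ [t.1])) := by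
        apply PySem.Dict.ext
        rw [PySem.Dict.items_insert_of_not_contains _ _ hvin, pvNum_append]
        have hsz : (((PySem.Dict.mk (pvNum ((S.filter (fun s => s.2.1 == t.2.1)).map (fun s => s.1)))).size : Nat) : Int)
            = (((S.filter (fun s => s.2.1 == t.2.1)).map (fun s => s.1)).length : Int) := by
          simp [PySem.Dict.size, pvNum, PySem.List.length_enumerate]
        rw [hsz]
      rw [pvAStep_of_contains _ _ hcont, hgd, hinner,
        PySem.Dict.items_insert_of_contains _ _ hcont, hitems, List.map_map,
        show ((S ++ [t]).map (fun s => s.2.1)) = S.map (fun s => s.2.1) ++ [t.2.1] by simp,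
        pvDedup_append, if_pos hr]
      apply List.map_congr_left
      intro r hrmem
      simp only [Function.comp_apply]
      by_cases hre : r = t.2.1
      · rw [if_pos (by simp [hre])]
        have hfil : ((S ++ [t]).filter (fun s => s.2.1 == r)).map (fun s => s.1)
            = ((S.filter (fun s => s.2.1 == t.2.1)).map (fun s => s.1)) ++ [t.1] := by
          rw [List.filter_append, hre]
          simp
        rw [hfil, hre]
      · rw [if_neg (by simp [hre]), pvFilter_append_ne S t r (fun h => hre h.symm)]
    · have hcont : (S.foldl pvAStep PySem.Dict.empty).contains t.2.1 = false := by
        rw [PySem.Dict.contains_eq_decide_mem_keys, hkeys]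
        simp [PySem.List.mem_dedup, hr]
      have hfilS : S.filter (fun s => s.2.1 == t.2.1) = [] := by
        rw [List.filter_eq_nil_iff]
        intro s hsmem hbeq
        have hse : s.2.1 = t.2.1 := by simpa using hbeq
        exact hr (hse ▸ List.mem_map_of_mem (f := fun s => s.2.1) hsmem)
      have hone : PySem.Dict.empty.insert t.1 (0 : Int)
          = PySem.Dict.mk (pvNum (((S ++ [t]).filter (fun s => s.2.1 == t.2.1)).map (fun s => s.1))) := by
        apply PySem.Dict.ext
        rw [PySem.Dict.items_insert_of_not_contains _ _ (PySem.Dict.contains_empty _)]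
        rw [List.filter_append, hfilS]
        simp [pvNum, PySem.List.enumerate_cons, PySem.List.enumerate_nil, PySem.Dict.empty]
      rw [pvAStep_of_not_contains _ _ hcont, hone,
        PySem.Dict.items_insert_of_not_contains _ _ hcont, hitems,
        show ((S ++ [t]).map (fun s => s.2.1)) = S.map (fun s => s.2.1) ++ [t.2.1] by simp,
        pvDedup_append, if_neg hr, List.map_append]
      congr 1
      apply List.map_congr_left
      intro r hrmem
      have hre : ¬ t.2.1 = r := fun h => hr (h ▸ (PySem.List.mem_dedup _ _).mp hrmem)
      rw [pvFilter_append_ne S t r hre]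

theorem pvEnumerate_map {α β : Type} (f : α → β) (l : List α) (s : Int) :
    PySem.List.enumerate (l.map f) s = (PySem.List.enumerate l s).map (fun p => (p.1, f p.2)) := by
  induction l generalizing s with
  | nil => simp [PySem.List.enumerate_nil]
  | cons x xs ih => simp [PySem.List.enumerate_cons, ih]

theorem pvInsertBy_map {α β : Type} (f : α → β) (bl : β → β → Bool) (x : α) (l : List α) :
    PySem.List.insertBy bl (f x) (l.map f) = (PySem.List.insertBy (fun a b => bl (f a) (f b)) x l).map f := by
  induction l with
  | nil => simp [PySem.List.insertBy]
  | cons y ys ih =>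
    simp only [List.map_cons, PySem.List.insertBy]
    by_cases h : bl (f x) (f y) = true
    · simp [h]
    · simp only [h]
      simp [Bool.not_eq_true] at h
      simp [h, ih]

theorem pvSorted_map (l : List (Int × (Int × Int))) :
    PySem.List.sorted (l.map (fun t => (t.1, t.2.2))) (fun t => t.2) =
      (PySem.List.sorted l (fun t => t.2.2)).map (fun t => (t.1, t.2.2)) := by
  rw [PySem.List.sorted_eq_foldl_insertBy, PySem.List.sorted_eq_foldl_insertBy, List.foldl_map]
  suffices h : ∀ (l : List (Int × (Int × Int))) (acc : List (Int × (Int × Int))),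
      l.foldl (fun acc x => PySem.List.insertBy (fun a b => decide (a.2 < b.2)) (x.1, x.2.2) acc)
          (acc.map (fun t => (t.1, t.2.2)))
        = (l.foldl (fun acc x => PySem.List.insertBy (fun a b => decide (a.2.2 < b.2.2)) x acc) acc).map
            (fun t => (t.1, t.2.2)) by
    simpa using h l []
  intro l
  induction l with
  | nil => intro acc; simp
  | cons x t ih =>
    intro acc
    simp only [List.foldl_cons]
    rw [show PySem.List.insertBy (fun a b => decide (a.2 < b.2)) (x.1, x.2.2) (acc.map (fun t => (t.1, t.2.2)))
        = (PySem.List.insertBy (fun a b => decide (a.2.2 < b.2.2)) x acc).map (fun t => (t.1, t.2.2)) from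
      pvInsertBy_map (fun t => (t.1, t.2.2)) (fun a b => decide (a.2 < b.2)) x acc]
    exact ih _

theorem pvBuckets_keys (S : List (Int × (Int × Int))) :
    (pvBuckets S).keys = PySem.List.dedup (S.map (fun t => t.2.1)) := by
  have h := PySem.Dict.keys_foldl_modify_key S (fun t => t.2.1) ([] : List (Int × Int))
    (fun d t l => l ++ [(t.1, t.2.2)]) PySem.Dict.empty
  simpa [pvBuckets, PySem.Set.update, PySem.Dict.keys_empty, ← PySem.Set.ofList_eq_foldl,
    PySem.List.dedup_eq_ofList] using h

theorem pvBuckets_getD (S : List (Int × (Int × Int))) (r : Int) :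
    (pvBuckets S).getD r [] = (S.filter (fun t => t.2.1 == r)).map (fun t => (t.1, t.2.2)) := by
  have hfold : pvBuckets S
      = (S.map (fun t => (t.2.1, (t.1, t.2.2)))).foldl
          (fun d p => d.modify p.1 [] (fun l => l ++ [p.2])) PySem.Dict.empty := by
    rw [pvBuckets, List.foldl_map]
  rw [hfold, PySem.Dict.getD_foldl_modify_append, PySem.Dict.getD_empty, List.filter_map]
  simp [Function.comp_def, List.map_map]

theorem pvFoldl_insert_items (l : List Int) (F : Int → PySem.Dict Int Int) (h : l.Nodup) :
    (l.foldl (fun u r => u.insert r (F r)) PySem.Dict.empty).items = l.map (fun r => (r, F r)) := by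
  have h2 := PySem.Dict.items_foldl_insert_fresh l (fun r => r) F PySem.Dict.empty
    (fun a _ => PySem.Dict.contains_empty _) (by simpa using h)
  simpa [PySem.Dict.empty] using h2

theorem pvOfList_items (ps : List (Int × Int)) (h : (ps.map (fun p => p.1)).Nodup) :
    (PySem.Dict.ofList ps).items = ps := by
  have h2 := PySem.Dict.items_foldl_insert_fresh ps (fun p => p.1) (fun p => p.2) PySem.Dict.empty
    (fun a _ => PySem.Dict.contains_empty _) h
  simpa [PySem.Dict.empty,
    show PySem.Dict.ofList ps = ps.foldl (fun d a => d.insert a.1 a.2) PySem.Dict.empty from rfl] using h2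

theorem pvEnum_fst (l : List (Int × (Int × Int))) :
    (PySem.List.enumerate l 0).map (fun p => p.2.1) = l.map (fun t => t.1) := by
  calc (PySem.List.enumerate l 0).map (fun p => p.2.1)
      = ((PySem.List.enumerate l 0).map (fun p => p.2)).map (fun t => t.1) := by
        rw [List.map_map]; simp [Function.comp_def]
    _ = l.map (fun t => t.1) := by rw [PySem.List.map_snd_enumerate]

theorem pvPairs_fst (l : List (Int × (Int × Int))) :
    (((PySem.List.enumerate (l.map (fun t => (t.1, t.2.2))) 0).map (fun p => (p.2.1, p.1))).map (fun p => p.1))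
      = l.map (fun t => t.1) := by
  rw [pvEnumerate_map, List.map_map, List.map_map]
  simpa [Function.comp_def] using pvEnum_fst l

theorem pvNum_map (l : List (Int × (Int × Int))) :
    pvNum (l.map (fun t => t.1))
      = (PySem.List.enumerate (l.map (fun t => (t.1, t.2.2))) 0).map (fun p => (p.2.1, p.1)) := by
  simp [pvNum, pvEnumerate_map, List.map_map, Function.comp_def]

-- the main equivalence of the two second halves
theorem pvMain (S : List (Int × (Int × Int))) (hnd : (S.map (fun t => t.1)).Nodup) :
    pvASide S = pvBSide S := by
  have hperm := PySem.List.sorted2_perm S (fun x => x.2.1) (fun x => x.2.2) false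
  have hnd2 : ((PySem.List.sorted2 S (fun x => x.2.1) (fun x => x.2.2)).map (fun t => t.1)).Nodup :=
    ((hperm.map (fun t => t.1)).nodup_iff).mpr hnd
  have hpw : (PySem.List.sorted2 S (fun x => x.2.1) (fun x => x.2.2)).Pairwise (fun a b => pvLex b a = false) := by
    rw [pvSorted2_eq]; exact pvPairwise_sort S
  have hpw1 : ((PySem.List.sorted2 S (fun x => x.2.1) (fun x => x.2.2)).map (fun t => t.2.1)).Pairwise (fun a b => a ≤ b) := by
    rw [List.pairwise_map]
    refine hpw.imp ?_
    intro a b h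
    rw [pvLex_false_iff] at h
    omega
  have hlt : (PySem.List.dedup ((PySem.List.sorted2 S (fun x => x.2.1) (fun x => x.2.2)).map (fun t => t.2.1))).Pairwise (fun a b => a < b) := by
    have hle := List.Pairwise.sublist (pvDedup_sublist _) hpw1
    have hne := PySem.List.nodup_dedup ((PySem.List.sorted2 S (fun x => x.2.1) (fun x => x.2.2)).map (fun t => t.2.1))
    exact (hle.and hne).imp (fun h => lt_of_le_of_ne h.1 h.2)
  have hpermk : (PySem.List.dedup ((PySem.List.sorted2 S (fun x => x.2.1) (fun x => x.2.2)).map (fun t => t.2.1))).Perm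
      (PySem.List.dedup (S.map (fun t => t.2.1))) := by
    refine (List.perm_ext_iff_of_nodup (PySem.List.nodup_dedup _) (PySem.List.nodup_dedup _)).mpr ?_
    intro a
    rw [PySem.List.mem_dedup, PySem.List.mem_dedup]
    exact (hperm.map (fun t => t.2.1)).mem_iff
  have hranks : PySem.List.sorted (pvBuckets S).keys (fun r => r)
      = PySem.List.dedup ((PySem.List.sorted2 S (fun x => x.2.1) (fun x => x.2.2)).map (fun t => t.2.1)) := by
    rw [pvBuckets_keys]
    exact PySem.List.sorted_eq_of_perm_of_pairwise_lt _ _ _ hpermk hlt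
  have houter := pvFoldl_insert_items
    (PySem.List.dedup ((PySem.List.sorted2 S (fun x => x.2.1) (fun x => x.2.2)).map (fun t => t.2.1)))
    (fun r => PySem.Dict.ofList ((PySem.List.enumerate
      (PySem.List.sorted ((pvBuckets S).getD r []) (fun t => t.2)) 0).map (fun p => (p.2.1, p.1))))
    (PySem.List.nodup_dedup _)
  unfold pvASide pvBSide
  rw [pvAFold_items _ hnd2, hranks, houter, List.map_map, List.map_map]
  apply List.map_congr_left
  intro r hr
  simp only [Function.comp_apply]
  congr 1
  show pvNum (((PySem.List.sorted2 S (fun x => x.2.1) (fun x => x.2.2)).filter (fun t => t.2.1 == r)).map (fun t => t.1))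
      = (PySem.Dict.ofList ((PySem.List.enumerate
          (PySem.List.sorted ((pvBuckets S).getD r []) (fun t => t.2)) 0).map (fun p => (p.2.1, p.1)))).items
  rw [pvBuckets_getD, pvSorted_map, pvFilter_sorted2, pvNum_map]
  have hσnd : ((PySem.List.sorted (S.filter (fun t => t.2.1 == r)) (fun t => t.2.2)).map (fun t => t.1)).Nodup := by
    have hsub : ((S.filter (fun t => t.2.1 == r)).map (fun t => t.1)).Sublist (S.map (fun t => t.1)) :=
      by exact List.Sublist.map _ List.filter_sublist
    have h1 := hnd.sublist hsub
    exact ((PySem.List.sorted_perm (S.filter (fun t => t.2.1 == r)) (fun t => t.2.2) false).map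
      (fun t => t.1)).nodup_iff.mpr h1
  rw [pvOfList_items _ (by rw [pvPairs_fst]; exact hσnd)]

-- ===== bridge from B's bucketing fold to pvBSide =====

-- A's normalized_ranks.get(v, 0) equals B's ranks.get(v, mn) - mn
theorem pvRk_eq (ranks : List (Int × Int)) (m : Int) (v : Int) :
    ((PySem.Dict.ofList ranks : PySem.Dict Int Int).items.foldl
        (fun d p => d.insert p.1 (p.2 - m)) PySem.Dict.empty).getD v 0
      = (PySem.Dict.ofList ranks : PySem.Dict Int Int).getD v m - m := by
  have hnd : (PySem.Dict.ofList ranks : PySem.Dict Int Int).keys.Nodup := PySem.Dict.nodup_keys_ofList ranks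
  have hitems : ((PySem.Dict.ofList ranks : PySem.Dict Int Int).items.foldl
        (fun d p => d.insert p.1 (p.2 - m)) PySem.Dict.empty).items
      = (PySem.Dict.ofList ranks : PySem.Dict Int Int).items.map (fun p => (p.1, p.2 - m)) := by
    have h2 := PySem.Dict.items_foldl_insert_fresh
      (PySem.Dict.ofList ranks : PySem.Dict Int Int).items (fun p => p.1) (fun p => p.2 - m)
      PySem.Dict.empty (fun a _ => PySem.Dict.contains_empty _) (by simpa [PySem.Dict.keys] using hnd)
    simpa [PySem.Dict.empty] using h2
  have hknd : ((PySem.Dict.ofList ranks : PySem.Dict Int Int).items.foldl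
        (fun d p => d.insert p.1 (p.2 - m)) PySem.Dict.empty).keys.Nodup := by
    simpa [PySem.Dict.keys, hitems, List.map_map, Function.comp_def] using hnd
  by_cases hv : v ∈ (PySem.Dict.ofList ranks : PySem.Dict Int Int).keys
  · rcases List.mem_map.mp hv with ⟨p, hpmem, hpv⟩
    have h1 : (PySem.Dict.ofList ranks : PySem.Dict Int Int).getD v m = p.2 := by
      have := PySem.Dict.getD_of_mem_items (PySem.Dict.ofList ranks : PySem.Dict Int Int)
        (k := p.1) (v := p.2) (by simpa using hpmem) hnd m
      rw [← hpv]; simpa using this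
    have h2 : ((PySem.Dict.ofList ranks : PySem.Dict Int Int).items.foldl
          (fun d p => d.insert p.1 (p.2 - m)) PySem.Dict.empty).getD v 0 = p.2 - m := by
      have hm2 : (v, p.2 - m) ∈ ((PySem.Dict.ofList ranks : PySem.Dict Int Int).items.foldl
          (fun d p => d.insert p.1 (p.2 - m)) PySem.Dict.empty).items := by
        rw [hitems]
        exact hpv ▸ List.mem_map_of_mem hpmem
      exact PySem.Dict.getD_of_mem_items _ hm2 hknd _
    rw [h1, h2]
  · have hc1 : (PySem.Dict.ofList ranks : PySem.Dict Int Int).contains v = false := by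
      rw [PySem.Dict.contains_eq_decide_mem_keys]; simpa using hv
    have hc2 : ((PySem.Dict.ofList ranks : PySem.Dict Int Int).items.foldl
          (fun d p => d.insert p.1 (p.2 - m)) PySem.Dict.empty).contains v = false := by
      rw [PySem.Dict.contains_eq_decide_mem_keys]
      simp only [PySem.Dict.keys, hitems, List.map_map]
      simpa [Function.comp_def, PySem.Dict.keys] using hv
    rw [PySem.Dict.getD_of_not_contains _ _ hc1, PySem.Dict.getD_of_not_contains _ _ hc2]
    omega

-- a nested loop over a list of lists is the loop over the flattened list
theorem pvFoldl_flat {α β γ : Type} (g : γ → β → γ) (f : α → List β) (l : List α) (e : γ) :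
    l.foldl (fun c a => (f a).foldl g c) e = (l.flatMap f).foldl g e := by
  induction l generalizing e with
  | nil => rfl
  | cons a t ih => simp only [List.foldl_cons, List.flatMap_cons, List.foldl_append, ih]

theorem pvVm_append (rk : Int → Int) (L : List (Int × Int)) (vp : Int × Int) :
    pvVm rk (L ++ [vp]) = (pvVm rk L).insert vp.1 (rk vp.1, vp.2) := by
  simp [pvVm, List.foldl_append]

theorem pvBk_append (rk : Int → Int) (L : List (Int × Int)) (vp : Int × Int) :
    pvBk rk (L ++ [vp])
      = (pvBk rk L).modify (rk vp.1) PySem.Dict.empty (fun inner => inner.insert vp.1 vp.2) := by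
  simp [pvBk, List.foldl_append]

-- every stored value carries the rank of its vertex
theorem pvVm_rank (rk : Int → Int) (L : List (Int × Int)) :
    ∀ t ∈ (pvVm rk L).items, t.2.1 = rk t.1 := by
  induction L using List.reverseRecOn with
  | nil => intro t ht; simp [pvVm, PySem.Dict.empty] at ht
  | append_singleton L vp ih =>
    intro t ht
    rw [pvVm_append] at ht
    rcases (PySem.Dict.mem_items_insert _ _ _ _).mp ht with rfl | ⟨hmem, -⟩
    · rfl
    · exact ih t hmem

theorem pvVm_nodup (rk : Int → Int) (L : List (Int × Int)) :
    ((pvVm rk L).items.map (fun t => t.1)).Nodup := by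
  have h := PySem.Dict.nodup_keys_foldl_insert_key L (fun vp => vp.1)
    (fun d vp => (rk vp.1, vp.2)) PySem.Dict.empty (by simp [PySem.Dict.keys_empty])
  simpa [pvVm, PySem.Dict.keys] using h

-- filter commutes with a map that preserves the predicate
theorem pvFilter_map_comm {α : Type} (g : α → α) (pr : α → Bool) (l : List α)
    (h : ∀ q ∈ l, pr (g q) = pr q) :
    (l.map g).filter pr = (l.filter pr).map g := by
  induction l with
  | nil => rfl
  | cons a t ih =>
    simp only [List.map_cons, List.filter_cons, h a (List.mem_cons_self)]
    by_cases hp : pr a = true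
    · simp [hp, ih (fun q hq => h q (List.mem_cons_of_mem _ hq))]
    · simp only [Bool.not_eq_true] at hp
      simp [hp, ih (fun q hq => h q (List.mem_cons_of_mem _ hq))]

-- B's buckets, characterised against the vertex map: same rank keys, and per rank
-- the bucket is the dict of (vertex, position) in vertex-map order
theorem pvBk_spec (rk : Int → Int) (L : List (Int × Int)) :
    (pvBk rk L).keys = PySem.List.dedup ((pvVm rk L).items.map (fun t => t.2.1)) ∧
    ∀ r, (pvBk rk L).getD r PySem.Dict.empty
        = PySem.Dict.mk (((pvVm rk L).items.filter (fun t => t.2.1 == r)).map (fun t => (t.1, t.2.2))) := by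
  induction L using List.reverseRecOn with
  | nil =>
    constructor
    · simp [pvBk, pvVm, PySem.Dict.empty, PySem.Dict.keys, PySem.List.dedup_eq_ofList]
    · intro r
      simp [pvBk, pvVm, PySem.Dict.empty, PySem.Dict.getD_empty]
      rfl
  | append_singleton L vp ih =>
    obtain ⟨ihK, ihG⟩ := ih
    have hCS := pvVm_rank rk L
    rw [pvVm_append, pvBk_append]
    by_cases hv : (pvVm rk L).contains vp.1 = true
    · -- vertex already present: the vmap entry is overwritten in place
      have hvmem : vp.1 ∈ (pvVm rk L).items.map (fun t => t.1) := by
        have := (PySem.Dict.contains_iff_mem_keys _ _).mp hv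
        simpa [PySem.Dict.keys] using this
      rcases List.mem_map.mp hvmem with ⟨t0, ht0mem, ht0v⟩
      have ht0r : t0.2.1 = rk vp.1 := by rw [hCS t0 ht0mem, ht0v]
      have hr0mem : rk vp.1 ∈ (pvVm rk L).items.map (fun t => t.2.1) :=
        ht0r ▸ List.mem_map_of_mem ht0mem
      have hitems' : ((pvVm rk L).insert vp.1 (rk vp.1, vp.2)).items
          = (pvVm rk L).items.map (fun q => if q.1 == vp.1 then (vp.1, (rk vp.1, vp.2)) else q) :=
        PySem.Dict.items_insert_of_contains _ _ hv
      have hranks' : (((pvVm rk L).insert vp.1 (rk vp.1, vp.2)).items.map (fun t => t.2.1))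
          = (pvVm rk L).items.map (fun t => t.2.1) := by
        rw [hitems', List.map_map]
        apply List.map_congr_left
        intro q hq
        by_cases hqv : q.1 = vp.1
        · have hq2 : q.2.1 = rk vp.1 := by rw [hCS q hq, hqv]
          simp [hqv, hq2]
        · simp [hqv]
      have hcontB : (pvBk rk L).contains (rk vp.1) = true := by
        rw [PySem.Dict.contains_iff_mem_keys, ihK, PySem.List.mem_dedup]
        exact hr0mem
      constructor
      · rw [PySem.Dict.keys_modify, PySem.Dict.keys_insert_of_contains _ _ hcontB, ihK, hranks']
      · intro r
        rw [PySem.Dict.getD_modify]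
        by_cases hr : r = rk vp.1
        · rw [if_pos hr, hr, ihG]
          apply PySem.Dict.ext
          have ht0fil : t0 ∈ (pvVm rk L).items.filter (fun t => t.2.1 == rk vp.1) :=
            List.mem_filter.mpr ⟨ht0mem, by simp [ht0r]⟩
          have hvinM : (PySem.Dict.mk (((pvVm rk L).items.filter (fun t => t.2.1 == rk vp.1)).map (fun t => (t.1, t.2.2)))).contains vp.1 = true := by
            rw [PySem.Dict.contains_eq_decide_mem_keys]
            simp only [PySem.Dict.keys, decide_eq_true_eq]
            show vp.1 ∈ (((pvVm rk L).items.filter (fun t => t.2.1 == rk vp.1)).map (fun t => (t.1, t.2.2))).map (fun p => p.1)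
            rw [List.map_map]
            exact List.mem_map.mpr ⟨t0, ht0fil, ht0v⟩
          rw [PySem.Dict.items_insert_of_contains _ _ hvinM, hitems']
          show (((pvVm rk L).items.filter (fun t => t.2.1 == rk vp.1)).map (fun t => (t.1, t.2.2))).map
              (fun p => if p.1 == vp.1 then (vp.1, vp.2) else p)
            = (((pvVm rk L).items.map (fun q => if q.1 == vp.1 then (vp.1, (rk vp.1, vp.2)) else q)).filter
                (fun t => t.2.1 == rk vp.1)).map (fun t => (t.1, t.2.2))
          rw [pvFilter_map_comm (fun q => if q.1 == vp.1 then (vp.1, (rk vp.1, vp.2)) else q)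
              (fun t => t.2.1 == rk vp.1) _ ?_]
          · rw [List.map_map, List.map_map]
            apply List.map_congr_left
            intro q hq
            simp only [Function.comp_apply]
            by_cases hqv : q.1 = vp.1
            · simp [hqv]
            · simp [hqv]
          · intro q hq
            by_cases hqv : q.1 = vp.1
            · have hq2 : q.2.1 = rk vp.1 := by rw [hCS q hq, hqv]
              simp [hqv, hq2]
            · simp [hqv]
        · rw [if_neg hr, ihG]
          congr 1
          rw [hitems',
            pvFilter_map_comm (fun q => if q.1 == vp.1 then (vp.1, (rk vp.1, vp.2)) else q)
              (fun t => t.2.1 == r) _ ?_]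
          · rw [List.map_map]
            apply List.map_congr_left
            intro q hq
            have hqr : q.2.1 = r := by simpa using (List.mem_filter.mp hq).2
            have hqv : ¬ q.1 = vp.1 := by
              intro hc
              apply hr
              rw [← hqr, hCS q (List.mem_of_mem_filter hq), hc]
            simp [hqv]
          · intro q hq
            by_cases hqv : q.1 = vp.1
            · have hq2 : q.2.1 = rk vp.1 := by rw [hCS q hq, hqv]
              have hne : ¬ rk vp.1 = r := fun h => hr h.symm
              simp [hqv, hq2, hne]
            · simp [hqv]
    · -- fresh vertex: appended to the vmap and to its rank's bucket
      have hv' : (pvVm rk L).contains vp.1 = false := by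
        cases h : (pvVm rk L).contains vp.1
        · rfl
        · exact absurd h hv
      have hvnot : vp.1 ∉ (pvVm rk L).items.map (fun t => t.1) := by
        intro hc
        apply hv
        rw [PySem.Dict.contains_iff_mem_keys]
        simpa [PySem.Dict.keys] using hc
      have hitems' : ((pvVm rk L).insert vp.1 (rk vp.1, vp.2)).items
          = (pvVm rk L).items ++ [(vp.1, (rk vp.1, vp.2))] :=
        PySem.Dict.items_insert_of_not_contains _ _ hv'
      have hranks' : (((pvVm rk L).insert vp.1 (rk vp.1, vp.2)).items.map (fun t => t.2.1))
          = (pvVm rk L).items.map (fun t => t.2.1) ++ [rk vp.1] := by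
        rw [hitems']; simp
      constructor
      · rw [PySem.Dict.keys_modify, hranks', pvDedup_append]
        by_cases hr0 : rk vp.1 ∈ (pvVm rk L).items.map (fun t => t.2.1)
        · have hcB : (pvBk rk L).contains (rk vp.1) = true := by
            rw [PySem.Dict.contains_iff_mem_keys, ihK, PySem.List.mem_dedup]
            exact hr0
          rw [PySem.Dict.keys_insert_of_contains _ _ hcB, ihK, if_pos hr0]
        · have hcB : (pvBk rk L).contains (rk vp.1) = false := by
            cases h : (pvBk rk L).contains (rk vp.1)
            · rfl
            · exact absurd (by
                have := (PySem.Dict.contains_iff_mem_keys _ _).mp h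
                rw [ihK, PySem.List.mem_dedup] at this
                exact this) hr0
          rw [PySem.Dict.keys_insert_of_not_contains _ _ hcB, ihK, if_neg hr0]
      · intro r
        rw [PySem.Dict.getD_modify]
        by_cases hr : r = rk vp.1
        · rw [if_pos hr, hr, ihG]
          apply PySem.Dict.ext
          have hvinM : (PySem.Dict.mk (((pvVm rk L).items.filter (fun t => t.2.1 == rk vp.1)).map (fun t => (t.1, t.2.2)))).contains vp.1 = false := by
            rw [PySem.Dict.contains_eq_decide_mem_keys]
            simp only [PySem.Dict.keys, decide_eq_false_iff_not]
            intro hmem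
            rw [List.map_map] at hmem
            rcases List.mem_map.mp hmem with ⟨q, hqmem, hqv⟩
            exact hvnot (List.mem_map.mpr ⟨q, List.mem_of_mem_filter hqmem, hqv⟩)
          rw [PySem.Dict.items_insert_of_not_contains _ _ hvinM, hitems', List.filter_append]
          simp
        · rw [if_neg hr, ihG, hitems',
            pvFilter_append_ne _ _ _ (fun h => hr h.symm)]

-- with pvBk_spec, B's second half is pvBSide of the vertex map's items
theorem pvBSide2_eq (rk : Int → Int) (L : List (Int × Int)) :
    pvBSide2 (pvBk rk L) = pvBSide (pvVm rk L).items := by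
  obtain ⟨hK, hG⟩ := pvBk_spec rk L
  have hmk : ∀ (l : List (Int × Int)), (PySem.Dict.mk l).items = l := fun _ => rfl
  unfold pvBSide2 pvBSide
  rw [hK, pvBuckets_keys]
  simp only [hG, hmk, pvBuckets_getD]

-- ===== VERDICT (by name: the statement is the Claim_ definition above) =====
theorem update_graph_ranks_spec : Claim_equal_update_graph_ranks := by
  intro graph ranks _ _
  unfold Spec_update_graph_ranks
  rw [pvA_eq, pvB_eq]
  cases PySem.List.min? (PySem.Dict.ofList ranks : PySem.Dict Int Int).values (fun v => v) with
  | none => rfl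
  | some m =>
    show pvASide _ = pvBSide2 _
    rw [pvFoldl_flat, pvFoldl_flat,
      show (PySem.Dict.ofList (graph.map (fun p => (p.1, PySem.Dict.ofList p.2))) : PySem.Dict Int (PySem.Dict Int Int)).values
        = (PySem.Dict.ofList (graph.map (fun p => (p.1, PySem.Dict.ofList p.2))) : PySem.Dict Int (PySem.Dict Int Int)).items.map (fun p => p.2) from rfl,
      List.flatMap_map]
    simp only [← pvRk_eq ranks m]
    show pvASide (pvVm
        (fun v => (((PySem.Dict.ofList ranks : PySem.Dict Int Int)).items.foldl
          (fun d p => d.insert p.1 (p.2 - m)) PySem.Dict.empty).getD v 0)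
        (((PySem.Dict.ofList (graph.map (fun p => (p.1, PySem.Dict.ofList p.2))) : PySem.Dict Int (PySem.Dict Int Int)).items).flatMap (fun lp => lp.2.items))).items
      = pvBSide2 (pvBk
        (fun v => (((PySem.Dict.ofList ranks : PySem.Dict Int Int)).items.foldl
          (fun d p => d.insert p.1 (p.2 - m)) PySem.Dict.empty).getD v 0)
        (((PySem.Dict.ofList (graph.map (fun p => (p.1, PySem.Dict.ofList p.2))) : PySem.Dict Int (PySem.Dict Int Int)).items).flatMap (fun lp => lp.2.items)))
    rw [pvBSide2_eq]
    exact pvMain _ (pvVm_nodup _ _)
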